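-- pv_equiv track=rewrite | github.com/swwho96/algo | programmers/container1/MockExam.py | solution
-- ===== SOURCE A (Python) =====
-- def solution(answers):
--     correct_cnt = [0,0,0]
--     one = [1,2,3,4,5] # 5으로 나눈 나머지
--     two = [2,1,2,3,2,4,2,5] # 8으로 나눈 나머지
--     three = [3,3,1,1,2,2,4,4,5,5] # 10으으로 나눈 나머지
--     result = []
--
--     for i, answer in enumerate(answers):
--         if answer == one[i%len(one)]:
--             correct_cnt[0] += 1
--         if answer == two[i%len(two)]:
--             correct_cnt[1] += 1
--         if answer == three[i%len(three)]:
--             correct_cnt[2] += 1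
--
--     for i, rank in enumerate(correct_cnt):
--         if max(correct_cnt) == rank:
--             result.append(i+1)
--     return result
-- ===== SOURCE B (Python) =====
-- def solution(answers):
--     # All three answer keys share the common period 40 = lcm(5, 8, 10), so each
--     # pattern's score depends only on how many times each (index mod 40, answer)
--     # pair occurs. Build that counter once, then score each pattern with 40 lookups.
--     P = 40
--     cnt = {}
--     for i, a in enumerate(answers):
--         key = (i % P, a)
--         cnt[key] = cnt.get(key, 0) + 1
--     patterns = [[1, 2, 3, 4, 5],
--                 [2, 1, 2, 3, 2, 4, 2, 5],
--                 [3, 3, 1, 1, 2, 2, 4, 4, 5, 5]]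
--     scores = [sum(cnt.get((r, p[r % len(p)]), 0) for r in range(P)) for p in patterns]
--     best = max(scores)
--     return [k + 1 for k, s in enumerate(scores) if s == best]
-- ===== Notes on version B (the rewrite author's own statement) =====
-- stated objective: alternative
-- what changed: A compares every answer against all three patterns in one fused pass keeping three counters; B instead builds a hash counter of (index mod 40, answer) pairs once (40 = lcm of the pattern periods) and scores each pattern with 40 counter lookups, so no per-answer pattern comparison remains.
import Mathlib
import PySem

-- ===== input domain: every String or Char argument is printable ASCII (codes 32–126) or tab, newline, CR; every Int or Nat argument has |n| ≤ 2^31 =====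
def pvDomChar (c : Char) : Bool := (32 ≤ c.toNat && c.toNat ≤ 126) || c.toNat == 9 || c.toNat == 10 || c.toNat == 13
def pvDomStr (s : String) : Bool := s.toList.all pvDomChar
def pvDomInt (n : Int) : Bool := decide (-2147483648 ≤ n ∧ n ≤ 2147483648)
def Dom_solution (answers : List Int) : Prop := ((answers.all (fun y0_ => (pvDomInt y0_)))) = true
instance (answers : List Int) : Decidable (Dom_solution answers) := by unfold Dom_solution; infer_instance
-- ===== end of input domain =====

-- B replaces A's per-answer comparison against the three patterns by a counter of
-- (index mod 40, answer) pairs built once (40 = lcm of the pattern periods), from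
-- which each pattern's score is read off with 40 lookups (objective: alternative).

-- ===== PORT A =====
-- Literal port of A: one fused pass over enumerate(answers) maintaining the 3-tuple
-- correct_cnt, then a loop over enumerate(correct_cnt) appending i+1 when max == rank.
def solution (answers : List Int) : List Int :=
  let one : List Int := [1, 2, 3, 4, 5]
  let two : List Int := [2, 1, 2, 3, 2, 4, 2, 5]
  let three : List Int := [3, 3, 1, 1, 2, 2, 4, 4, 5, 5]
  let cnt : Int × Int × Int :=
    (PySem.List.enumerate answers).foldl
      (fun (c : Int × Int × Int) ia =>
        let c := if ia.2 = PySem.List.pyGetD one (PySem.Int.mod ia.1 (one.length : Int)) 0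
                 then (c.1 + 1, c.2.1, c.2.2) else c
        let c := if ia.2 = PySem.List.pyGetD two (PySem.Int.mod ia.1 (two.length : Int)) 0
                 then (c.1, c.2.1 + 1, c.2.2) else c
        if ia.2 = PySem.List.pyGetD three (PySem.Int.mod ia.1 (three.length : Int)) 0
        then (c.1, c.2.1, c.2.2 + 1) else c)
      (0, 0, 0)
  let correct_cnt : List Int := [cnt.1, cnt.2.1, cnt.2.2]
  (PySem.List.enumerate correct_cnt).foldl
    (fun res p =>
      if (PySem.List.max? correct_cnt (fun y => y)).getD 0 = p.2 then res ++ [p.1 + 1] else res)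
    []

-- ===== PORT B =====
def solution_alt (answers : List Int) : List Int :=
  let P : Int := 40
  -- for i, a in enumerate(answers): cnt[(i % P, a)] = cnt.get((i % P, a), 0) + 1
  let cnt : PySem.Dict (Int × Int) Int :=
    (PySem.List.enumerate answers).foldl
      (fun d ia =>
        let key : Int × Int := (PySem.Int.mod ia.1 P, ia.2)
        d.insert key (d.getD key 0 + 1))
      PySem.Dict.empty
  let patterns : List (List Int) :=
    [[1, 2, 3, 4, 5], [2, 1, 2, 3, 2, 4, 2, 5], [3, 3, 1, 1, 2, 2, 4, 4, 5, 5]]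
  -- scores = [sum(cnt.get((r, p[r % len(p)]), 0) for r in range(P)) for p in patterns]
  let scores : List Int := patterns.map (fun p =>
    (PySem.List.pyRange 0 P 1).foldl
      (fun s r => s + cnt.getD (r, PySem.List.pyGetD p (PySem.Int.mod r (p.length : Int)) 0) 0)
      0)
  let best : Int := (PySem.List.max? scores (fun y => y)).getD 0
  (PySem.List.enumerate scores).foldl
    (fun res q => if q.2 = best then res ++ [q.1 + 1] else res) []

-- ===== PRECONDITION & SPEC =====
def Spec_solution (answers : List Int) (out : List Int) : Prop := out = solution_alt answers
instance (answers : List Int) (out : List Int) : Decidable (Spec_solution answers out) := by unfold Spec_solution; infer_instance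

-- ===== CLAIM (what is proved, stated in full; the proofs are below) =====
def Claim_equal_solution : Prop := ∀ (answers : List Int), Dom_solution answers → Spec_solution answers (solution answers)

-- ===== LEMMAS AND PROOFS =====

-- proof helper: the simple counting fold a single pattern p induces over enumerate(answers)
def pvMatchCount (p : List Int) (answers : List Int) : Int :=
  (PySem.List.enumerate answers).foldl
    (fun s ia =>
      s + (if ia.2 = PySem.List.pyGetD p (PySem.Int.mod ia.1 (p.length : Int)) 0 then 1 else 0))
    0

-- proof helper: A's counting fold, named so it can be rewritten
def pvCntFold (answers : List Int) : Int × Int × Int :=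
  (PySem.List.enumerate answers).foldl
    (fun (c : Int × Int × Int) ia =>
      let c := if ia.2 = PySem.List.pyGetD [1, 2, 3, 4, 5]
                    (PySem.Int.mod ia.1 (([1, 2, 3, 4, 5] : List Int).length : Int)) 0
               then (c.1 + 1, c.2.1, c.2.2) else c
      let c := if ia.2 = PySem.List.pyGetD [2, 1, 2, 3, 2, 4, 2, 5]
                    (PySem.Int.mod ia.1 (([2, 1, 2, 3, 2, 4, 2, 5] : List Int).length : Int)) 0
               then (c.1, c.2.1 + 1, c.2.2) else c
      if ia.2 = PySem.List.pyGetD [3, 3, 1, 1, 2, 2, 4, 4, 5, 5]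
            (PySem.Int.mod ia.1 (([3, 3, 1, 1, 2, 2, 4, 4, 5, 5] : List Int).length : Int)) 0
      then (c.1, c.2.1, c.2.2 + 1) else c)
    (0, 0, 0)

-- proof helpers: the two result-selection stages as functions of the score list
def pvStage (s : List Int) : List Int :=
  (PySem.List.enumerate s).foldl
    (fun res p => if (PySem.List.max? s (fun y => y)).getD 0 = p.2 then res ++ [p.1 + 1] else res) []

def pvStageB (s : List Int) : List Int :=
  (PySem.List.enumerate s).foldl
    (fun res p => if p.2 = (PySem.List.max? s (fun y => y)).getD 0 then res ++ [p.1 + 1] else res) []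

-- a fold that only adds f x to the accumulator pulls the start value out
theorem pv_foldl_add_out (f : Int × Int → Int) (l : List (Int × Int)) (a : Int) :
    l.foldl (fun s x => s + f x) a = a + l.foldl (fun s x => s + f x) 0 := by
  induction l generalizing a with
  | nil => simp
  | cons x t ih => simp only [List.foldl_cons]
                   rw [ih (a + f x), ih (0 + f x)]; ring

-- A's fused 3-counter pass computes the three per-pattern scores independently
theorem pv_cnt (g1 g2 g3 : Int → Int) (l : List (Int × Int)) (c : Int × Int × Int) :
    l.foldl (fun (c : Int × Int × Int) ia =>
        let c := if ia.2 = g1 ia.1 then (c.1 + 1, c.2.1, c.2.2) else c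
        let c := if ia.2 = g2 ia.1 then (c.1, c.2.1 + 1, c.2.2) else c
        if ia.2 = g3 ia.1 then (c.1, c.2.1, c.2.2 + 1) else c) c
    = (c.1 + l.foldl (fun s ia => s + (if ia.2 = g1 ia.1 then 1 else 0)) 0,
       c.2.1 + l.foldl (fun s ia => s + (if ia.2 = g2 ia.1 then 1 else 0)) 0,
       c.2.2 + l.foldl (fun s ia => s + (if ia.2 = g3 ia.1 then 1 else 0)) 0) := by
  induction l generalizing c with
  | nil => simp
  | cons x t ih =>
      simp only [List.foldl_cons]
      rw [ih]
      rw [pv_foldl_add_out _ _ (0 + if x.2 = g1 x.1 then 1 else 0),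
          pv_foldl_add_out _ _ (0 + if x.2 = g2 x.1 then 1 else 0),
          pv_foldl_add_out _ _ (0 + if x.2 = g3 x.1 then 1 else 0)]
      split_ifs <;> refine Prod.ext ?_ (Prod.ext ?_ ?_) <;> simp <;> ring

-- A's counting fold = the triple of per-pattern match counts
theorem pv_cnt_scores (answers : List Int) :
    pvCntFold answers
      = (pvMatchCount [1, 2, 3, 4, 5] answers,
         pvMatchCount [2, 1, 2, 3, 2, 4, 2, 5] answers,
         pvMatchCount [3, 3, 1, 1, 2, 2, 4, 4, 5, 5] answers) := by
  have h := pv_cnt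
    (fun i => PySem.List.pyGetD [1, 2, 3, 4, 5]
        (PySem.Int.mod i (([1, 2, 3, 4, 5] : List Int).length : Int)) 0)
    (fun i => PySem.List.pyGetD [2, 1, 2, 3, 2, 4, 2, 5]
        (PySem.Int.mod i (([2, 1, 2, 3, 2, 4, 2, 5] : List Int).length : Int)) 0)
    (fun i => PySem.List.pyGetD [3, 3, 1, 1, 2, 2, 4, 4, 5, 5]
        (PySem.Int.mod i (([3, 3, 1, 1, 2, 2, 4, 4, 5, 5] : List Int).length : Int)) 0)
    (PySem.List.enumerate answers) (0, 0, 0)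
  simp only [zero_add] at h
  exact h

-- the two selection stages agree on any 3-element score list (only the equality is flipped)
set_option maxHeartbeats 1000000 in
theorem pv_stage_eq (s0 s1 s2 : Int) : pvStage [s0, s1, s2] = pvStageB [s0, s1, s2] := by
  unfold pvStage pvStageB
  simp [PySem.List.enumerate, eq_comm]

-- a 0/1 indicator sum over R counts the occurrences of a in R
theorem pv_sum_ind (R : List Int) (a : Int) :
    (R.map (fun r => if r = a then (1 : Int) else 0)).sum = (R.count a : Int) := by
  induction R with
  | nil => simp
  | cons y t ih =>
      simp only [List.map_cons, List.sum_cons, ih, List.count_cons]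
      by_cases h : y = a
      · simp [h]; ring
      · simp [h]

-- summing, over a duplicate-free index list R, the multiplicities of (r, g r) in a pair
-- list L whose first components all lie in R, counts the members of L matching g
theorem pv_sum_count (g : Int → Int) (R : List Int) (L : List (Int × Int))
    (hnd : R.Nodup) (hmem : ∀ x ∈ L, x.1 ∈ R) :
    R.foldl (fun s r => s + ((L.count (r, g r) : Nat) : Int)) 0
      = L.foldl (fun s x => s + (if x.2 = g x.1 then 1 else 0)) 0 := by
  induction L with
  | nil => simp
  | cons x t ih =>
      have hx : x.1 ∈ R := hmem x (by simp)
      have ht : ∀ y ∈ t, y.1 ∈ R := fun y hy => hmem y (by simp [hy])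
      rw [List.foldl_cons, pv_foldl_add_out _ t]
      rw [← ih ht]
      rw [PySem.List.foldl_add R (fun r => ((t.count (r, g r) : Nat) : Int)) 0,
          PySem.List.foldl_add R (fun r => (((x :: t).count (r, g r) : Nat) : Int)) 0]
      simp only [zero_add]
      have hcount : ∀ r : Int, (((x :: t).count (r, g r) : Nat) : Int)
          = ((t.count (r, g r) : Nat) : Int) + (if (r, g r) = x then 1 else 0) := by
        intro r
        by_cases h : (r, g r) = x
        · simp [h]
        · have : ¬ x = (r, g r) := fun he => h he.symm
          simp [this, h]
      have hmapeq : R.map (fun r => (((x :: t).count (r, g r) : Nat) : Int))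
          = R.map (fun r => ((t.count (r, g r) : Nat) : Int)
              + (if (r, g r) = x then 1 else 0)) := by
        exact List.map_congr_left (fun r _ => hcount r)
      rw [hmapeq, PySem.List.sum_map_add_int]
      have hind : (R.map (fun r => if (r, g r) = x then (1 : Int) else 0)).sum
          = (if x.2 = g x.1 then 1 else 0) := by
        by_cases hgx : x.2 = g x.1
        · have : ∀ r ∈ R, (if (r, g r) = x then (1 : Int) else 0)
              = (if r = x.1 then 1 else 0) := by
            intro r _
            by_cases hr : r = x.1
            · subst hr; simp [hgx.symm]
            · simp [Prod.ext_iff, hr]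
          rw [List.map_congr_left this, pv_sum_ind R x.1,
              List.count_eq_one_of_mem hnd hx]
          simp [hgx]
        · have : ∀ r ∈ R, (if (r, g r) = x then (1 : Int) else 0) = 0 := by
            intro r _
            have : ¬ (r, g r) = x := by
              intro he
              exact hgx (by rw [← he])
            simp [this]
          rw [List.map_congr_left this]
          simp [hgx]
      rw [hind]
      ring

-- B's range-of-residues score for pattern p equals the per-pattern match count,
-- provided p's length divides 40
theorem pv_score_eq (p : List Int) (answers : List Int)
    (hdvd : (p.length : Int) ∣ 40) (hpos : 0 < p.length) :
    (PySem.List.pyRange 0 40 1).foldl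
      (fun s r =>
        s + (PySem.Dict.counter
              ((PySem.List.enumerate answers).map
                (fun ia => (PySem.Int.mod ia.1 40, ia.2)))).getD
            (r, PySem.List.pyGetD p (PySem.Int.mod r (p.length : Int)) 0) 0)
      0
    = pvMatchCount p answers := by
  set L := (PySem.List.enumerate answers).map (fun ia => (PySem.Int.mod ia.1 40, ia.2)) with hL
  set g : Int → Int := fun r => PySem.List.pyGetD p (PySem.Int.mod r (p.length : Int)) 0 with hg
  have hget : ∀ r : Int,
      (PySem.Dict.counter L).getD (r, g r) 0 = ((L.count (r, g r) : Nat) : Int) := by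
    intro r; exact PySem.Dict.getD_counter L (r, g r)
  have step1 : (PySem.List.pyRange 0 40 1).foldl
      (fun s r => s + (PySem.Dict.counter L).getD (r, g r) 0) 0
      = (PySem.List.pyRange 0 40 1).foldl
      (fun s r => s + ((L.count (r, g r) : Nat) : Int)) 0 := by
    apply List.foldl_ext
    intro s r _; rw [hget r]
  rw [step1]
  have hnd : (PySem.List.pyRange 0 40 1).Nodup := PySem.List.nodup_pyRange_one 0 40
  have hmem : ∀ x ∈ L, x.1 ∈ PySem.List.pyRange 0 40 1 := by
    intro x hx
    rw [hL] at hx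
    rcases List.mem_map.mp hx with ⟨ia, _, rfl⟩
    rw [PySem.List.mem_pyRange_one]
    exact ⟨PySem.Int.mod_nonneg ia.1 (by norm_num), PySem.Int.mod_lt ia.1 (by norm_num)⟩
  rw [pv_sum_count g _ L hnd hmem]
  -- now fold over L = map key (enumerate answers); push through the map
  rw [hL, List.foldl_map]
  unfold pvMatchCount
  apply List.foldl_ext
  intro s ia _
  -- (i % 40) % len p = i % len p since len p ∣ 40
  have hlp : (0 : Int) < (p.length : Int) := by exact_mod_cast hpos
  have hmm : PySem.Int.mod (PySem.Int.mod ia.1 40) ((p.length : Nat) : Int)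
      = PySem.Int.mod ia.1 ((p.length : Nat) : Int) := by
    rw [PySem.Int.mod_eq_emod_of_pos (by norm_num : (0 : Int) < 40),
        PySem.Int.mod_eq_emod_of_pos hlp, PySem.Int.mod_eq_emod_of_pos hlp]
    exact Int.emod_emod_of_dvd ia.1 hdvd
  rw [hg]
  simp only [hmm]

-- ===== VERDICT (by name: the statement is the Claim_ definition above) =====
theorem solution_spec : Claim_equal_solution := by
  intro answers _
  show solution answers = solution_alt answers
  have keyA : solution answers
      = pvStage [(pvCntFold answers).1, (pvCntFold answers).2.1, (pvCntFold answers).2.2] := rfl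
  have keyB : solution_alt answers
      = pvStageB
          [(PySem.List.pyRange 0 40 1).foldl
            (fun s r =>
              s + ((PySem.List.enumerate answers).foldl
                    (fun d ia =>
                      let key : Int × Int := (PySem.Int.mod ia.1 40, ia.2)
                      d.insert key (d.getD key 0 + 1))
                    PySem.Dict.empty).getD
                  (r, PySem.List.pyGetD [1, 2, 3, 4, 5]
                    (PySem.Int.mod r (([1, 2, 3, 4, 5] : List Int).length : Int)) 0) 0) 0,
           (PySem.List.pyRange 0 40 1).foldl
            (fun s r =>
              s + ((PySem.List.enumerate answers).foldl
                    (fun d ia =>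
                      let key : Int × Int := (PySem.Int.mod ia.1 40, ia.2)
                      d.insert key (d.getD key 0 + 1))
                    PySem.Dict.empty).getD
                  (r, PySem.List.pyGetD [2, 1, 2, 3, 2, 4, 2, 5]
                    (PySem.Int.mod r (([2, 1, 2, 3, 2, 4, 2, 5] : List Int).length : Int)) 0) 0) 0,
           (PySem.List.pyRange 0 40 1).foldl
            (fun s r =>
              s + ((PySem.List.enumerate answers).foldl
                    (fun d ia =>
                      let key : Int × Int := (PySem.Int.mod ia.1 40, ia.2)
                      d.insert key (d.getD key 0 + 1))
                    PySem.Dict.empty).getD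
                  (r, PySem.List.pyGetD [3, 3, 1, 1, 2, 2, 4, 4, 5, 5]
                    (PySem.Int.mod r (([3, 3, 1, 1, 2, 2, 4, 4, 5, 5] : List Int).length : Int)) 0) 0) 0] := rfl
  have hctr : (PySem.List.enumerate answers).foldl
      (fun d ia =>
        let key : Int × Int := (PySem.Int.mod ia.1 40, ia.2)
        d.insert key (d.getD key 0 + 1))
      PySem.Dict.empty
    = PySem.Dict.counter
        ((PySem.List.enumerate answers).map (fun ia => (PySem.Int.mod ia.1 40, ia.2))) := by
    rw [← PySem.Dict.foldl_insert_getD_add_one_eq_counter, List.foldl_map]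
  rw [keyA, keyB, hctr, pv_cnt_scores]
  rw [pv_score_eq [1, 2, 3, 4, 5] answers (by norm_num) (by norm_num),
      pv_score_eq [2, 1, 2, 3, 2, 4, 2, 5] answers (by norm_num) (by norm_num),
      pv_score_eq [3, 3, 1, 1, 2, 2, 4, 4, 5, 5] answers (by norm_num) (by norm_num)]
  exact pv_stage_eq _ _ _
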